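-- pv_equiv track=rewrite | github.com/VeggyMeat/BIO_Practice | BIO_2012/Q3.py | words_adj
-- ===== SOURCE A (Python) =====
-- def words_adj(word1, word2):
--     dict1 = {}
--     dict2 = {}
--     for letter in word1:
--         if letter in dict1:
--             dict1[letter] += 1
--         else:
--             dict1[letter] = 1
--
--     for letter in word2:
--         if letter in dict2:
--             dict2[letter] += 1
--         else:
--             dict2[letter] = 1
--
--     dif = 0
--     for letter in dict1:
--         if letter in dict2:
--             dif += abs(dict1[letter] - dict2[letter])
--         else:
--             dif += dict1[letter]
--
--     for letter in dict2:
--         if letter not in dict1: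
--             dif += dict2[letter]
--
--     if dif <= 5:
--         return True
--     return False
-- ===== SOURCE B (Python) =====
-- def words_adj(word1, word2):
--     common = 0
--     for ch in set(word1):
--         common += min(word1.count(ch), word2.count(ch))
--     return len(word1) + len(word2) - 2 * common <= 5
-- ===== Notes on version B (the rewrite author's own statement) =====
-- stated objective: simpler
-- what changed: Replaces the two dict-building passes and the two key-walking loops that accumulate per-letter absolute differences with a single pass over the distinct letters of word1 computing the multiset-intersection size, using the identity sum|c1-c2| = len(word1)+len(word2)-2*common.
import Mathlib
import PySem

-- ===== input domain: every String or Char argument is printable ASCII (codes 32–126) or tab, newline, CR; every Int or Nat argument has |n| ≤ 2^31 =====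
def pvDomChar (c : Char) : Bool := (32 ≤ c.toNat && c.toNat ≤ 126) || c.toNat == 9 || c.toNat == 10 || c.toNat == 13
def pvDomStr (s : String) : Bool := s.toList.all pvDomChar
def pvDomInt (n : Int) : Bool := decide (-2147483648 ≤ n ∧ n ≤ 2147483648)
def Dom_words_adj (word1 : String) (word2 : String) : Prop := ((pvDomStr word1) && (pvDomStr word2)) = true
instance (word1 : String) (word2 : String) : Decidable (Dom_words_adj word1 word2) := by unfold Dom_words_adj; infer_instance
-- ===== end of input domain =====

-- B replaces A's per-letter absolute-difference accumulation over both dicts by the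
-- multiset-intersection size and the identity sum|c1-c2| = len1+len2-2*common (objective: simpler).

-- ===== PORT A =====
def words_adj (word1 : String) (word2 : String) : Bool :=
  let dict1 : PySem.Dict Char Int := word1.toList.foldl (fun d letter =>
    if d.contains letter then d.insert letter (d.getD letter 0 + 1)
    else d.insert letter 1) PySem.Dict.empty
  let dict2 : PySem.Dict Char Int := word2.toList.foldl (fun d letter =>
    if d.contains letter then d.insert letter (d.getD letter 0 + 1)
    else d.insert letter 1) PySem.Dict.empty
  let dif : Int := dict1.keys.foldl (fun dif letter =>
    if dict2.contains letter then dif + |dict1.getD letter 0 - dict2.getD letter 0|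
    else dif + dict1.getD letter 0) 0
  let dif : Int := dict2.keys.foldl (fun dif letter =>
    if !(dict1.contains letter) then dif + dict2.getD letter 0 else dif) dif
  if dif ≤ 5 then true else false

-- ===== PORT B =====
def words_adj_alt (word1 : String) (word2 : String) : Bool :=
  let l1 := word1.toList
  let l2 := word2.toList
  let common : Int := (PySem.Set.ofList l1).foldl
    (fun common ch => common + min (l1.count ch : Int) (l2.count ch : Int)) 0
  decide ((l1.length : Int) + (l2.length : Int) - 2 * common ≤ 5)

-- ===== PRECONDITION & SPEC =====
def Spec_words_adj (word1 : String) (word2 : String) (out : Bool) : Prop := out = words_adj_alt word1 word2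
instance (word1 : String) (word2 : String) (out : Bool) : Decidable (Spec_words_adj word1 word2 out) := by unfold Spec_words_adj; infer_instance

-- ===== CLAIM (what is proved, stated in full; the proofs are below) =====
def Claim_equal_words_adj : Prop := ∀ (word1 : String) (word2 : String), Dom_words_adj word1 word2 → Spec_words_adj word1 word2 (words_adj word1 word2)

-- ===== LEMMAS AND PROOFS =====

-- A's dict-building loop is Counter(xs)
lemma build_eq_counter (l : List Char) :
    l.foldl (fun d letter =>
      if d.contains letter then d.insert letter (d.getD letter 0 + 1)
      else d.insert letter 1) (PySem.Dict.empty : PySem.Dict Char Int)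
    = PySem.Dict.counter l := by
  rw [← PySem.Dict.foldl_insert_getD_add_one_eq_counter]
  congr 1
  funext d c
  by_cases h : d.contains c
  · simp [h]
  · have h0 : d.getD c (0 : Int) = 0 := by
      simp [PySem.Dict.getD, (PySem.Dict.get?_eq_none_iff_contains d c).2 (by simpa using h)]
    simp [h, h0]

-- the toFinset of the deduped list is the list's toFinset
lemma toFinset_ofList (l : List Char) : (PySem.Set.ofList l).toFinset = l.toFinset := by
  ext c; simp [PySem.Set.mem_ofList]

-- |a - b| = a + b - 2 * min a b over ℤ
lemma abs_sub_eq (a b : Int) : |a - b| = a + b - 2 * min a b := by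
  rcases le_total a b with h | h
  · rw [abs_of_nonpos (by omega), min_eq_left h]; ring
  · rw [abs_of_nonneg (by omega), min_eq_right h]; ring

-- the heart: A's accumulated difference equals len1 + len2 - 2*common
lemma dif_eq_formula (l1 l2 : List Char) :
    ((PySem.Set.ofList l1).map (fun c =>
        if l2.contains c then |(l1.count c : Int) - (l2.count c : Int)| else (l1.count c : Int))).sum
      + ((PySem.Set.ofList l2).map (fun c =>
        if l1.contains c then 0 else (l2.count c : Int))).sum
    = (l1.length : Int) + (l2.length : Int)
      - 2 * ((PySem.Set.ofList l1).map (fun c =>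
          min (l1.count c : Int) (l2.count c : Int))).sum := by
  classical
  set h : Char → Int := fun c =>
    (l1.count c : Int) + (l2.count c : Int) - 2 * min (l1.count c : Int) (l2.count c : Int) with hh
  have e1 : ((PySem.Set.ofList l1).map (fun c =>
      if l2.contains c then |(l1.count c : Int) - (l2.count c : Int)| else (l1.count c : Int))).sum
      = ∑ c ∈ l1.toFinset, h c := by
    rw [← List.sum_toFinset _ (PySem.Set.nodup_ofList l1), toFinset_ofList]
    refine Finset.sum_congr rfl (fun c hc => ?_)
    by_cases hm : c ∈ l2
    · simp only [hh, List.contains_eq_mem, hm, decide_true, if_true]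
      exact abs_sub_eq _ _
    · have hz : l2.count c = 0 := List.count_eq_zero.2 hm
      simp [hh, List.contains_eq_mem, hm, hz]
  have e2 : ((PySem.Set.ofList l2).map (fun c =>
      if l1.contains c then 0 else (l2.count c : Int))).sum
      = ∑ c ∈ l2.toFinset \ l1.toFinset, h c := by
    rw [← List.sum_toFinset _ (PySem.Set.nodup_ofList l2), toFinset_ofList]
    have key : ∀ c ∈ l2.toFinset, (if l1.contains c then 0 else (l2.count c : Int))
        = if c ∉ l1.toFinset then h c else 0 := by
      intro c hc
      by_cases hm : c ∈ l1
      · simp [List.contains_eq_mem, hm]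
      · have hz : l1.count c = 0 := List.count_eq_zero.2 hm
        simp [hh, List.contains_eq_mem, hm, hz]
    rw [Finset.sum_congr rfl key, Finset.sum_ite, Finset.sum_const_zero, add_zero,
      Finset.sdiff_eq_filter]
  have e3 : ((PySem.Set.ofList l1).map (fun c =>
      min (l1.count c : Int) (l2.count c : Int))).sum
      = ∑ c ∈ l1.toFinset ∪ l2.toFinset, min (l1.count c : Int) (l2.count c : Int) := by
    rw [← List.sum_toFinset _ (PySem.Set.nodup_ofList l1), toFinset_ofList]
    refine Finset.sum_subset Finset.subset_union_left (fun c _ hc => ?_)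
    have hz : l1.count c = 0 := List.count_eq_zero.2 (by simpa using hc)
    simp [hz]
  have lenlem : ∀ l : List Char, l.toFinset ⊆ l1.toFinset ∪ l2.toFinset →
      ∑ c ∈ l1.toFinset ∪ l2.toFinset, (l.count c : Int) = l.length := by
    intro l hsub
    rw [← Finset.sum_subset hsub (fun c _ hc => by
      simp [List.count_eq_zero.2 (by simpa using hc)])]
    rw [← Nat.cast_sum, List.sum_toFinset_count_eq_length]
  rw [e1, e2, ← Finset.sum_union Finset.sdiff_disjoint.symm, Finset.union_sdiff_self_eq_union, e3]
  have expand : ∑ c ∈ l1.toFinset ∪ l2.toFinset, h c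
      = (∑ c ∈ l1.toFinset ∪ l2.toFinset, (l1.count c : Int))
        + (∑ c ∈ l1.toFinset ∪ l2.toFinset, (l2.count c : Int))
        - 2 * ∑ c ∈ l1.toFinset ∪ l2.toFinset, min (l1.count c : Int) (l2.count c : Int) := by
    rw [Finset.mul_sum, ← Finset.sum_add_distrib, ← Finset.sum_sub_distrib]
  rw [expand, lenlem l1 Finset.subset_union_left, lenlem l2 Finset.subset_union_right]

-- A's two accumulation loops, as sums
lemma foldl_if_add_add (P : Char → Bool) (f g : Char → Int) (keys : List Char) (init : Int) :
    keys.foldl (fun dif c => if P c then dif + f c else dif + g c) init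
    = init + (keys.map (fun c => if P c then f c else g c)).sum := by
  rw [← PySem.List.foldl_add keys (fun c => if P c then f c else g c) init]
  congr 1
  funext dif c
  split <;> rfl

lemma foldl_if_add (P : Char → Bool) (f : Char → Int) (keys : List Char) (init : Int) :
    keys.foldl (fun dif c => if P c then dif + f c else dif) init
    = init + (keys.map (fun c => if P c then f c else 0)).sum := by
  rw [← PySem.List.foldl_add keys (fun c => if P c then f c else 0) init]
  congr 1
  funext dif c
  split <;> simp

-- ===== VERDICT (by name: the statement is the Claim_ definition above) =====
theorem words_adj_spec : Claim_equal_words_adj := by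
  intro word1 word2 _
  unfold Spec_words_adj words_adj words_adj_alt
  simp only [build_eq_counter, PySem.Dict.keys_counter, PySem.Dict.contains_counter,
    PySem.Dict.getD_counter]
  rw [foldl_if_add_add, foldl_if_add, zero_add]
  have flip : (fun c => if !(word1.toList.contains c) then (word2.toList.count c : Int) else 0)
      = fun c => if word1.toList.contains c then 0 else (word2.toList.count c : Int) := by
    funext c
    cases h : word1.toList.contains c <;> simp

  rw [flip, PySem.List.foldl_add _ _ 0, zero_add]
  have key := dif_eq_formula word1.toList word2.toList
  rw [key]
  split <;> simp_all
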